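-- pv_equiv track=rewrite | github.com/ChemBioHTP/EnzyExtract | kcatextract/fetch_sequences/confirm_enzyme_sequences.py | to_matcher_dict
-- ===== SOURCE A (Python) =====
-- MutantMatcher = list[tuple[str, int, str]]
--
-- def to_matcher_dict(codes: MutantMatcher, allow_mut=False):
--
--     result = {}
--     if not codes:
--         return result
--     first_char, min_point, _ = codes[0]
--     for first_char, point, last_char in codes:
--         if first_char not in result.setdefault(point, ''):
--             result[point] += first_char
--         if allow_mut:
--             if last_char not in result.setdefault(point, ''):
--                 result[point] += last_char
--     return result, min_point
-- ===== SOURCE B (Python) =====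
-- def to_matcher_dict(codes, allow_mut=False):
--     if not codes:
--         return {}
--     # pass 1: group the pieces (first_char, and last_char when allow_mut) by point, in order
--     groups = {}
--     for first_char, point, last_char in codes:
--         groups.setdefault(point, []).append(first_char)
--         if allow_mut:
--             groups[point].append(last_char)
--     # pass 2: collapse each group into its substring-deduplicated concatenation
--     result = {}
--     for point, pieces in groups.items():
--         acc = ''
--         for p in pieces:
--             if p not in acc:
--                 acc += p
--         result[point] = acc
--     return result, codes[0][1]
-- ===== Notes on version B (the rewrite author's own statement) =====
-- stated objective: alternative
-- what changed: Replaces A's single loop that interleaves setdefault/membership-dedup per code with a two-pass group-then-reduce structure: pass 1 groups all pieces per point into lists, pass 2 collapses each list into its dedup-concatenated string and builds the result dict.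
-- outside the precondition, e.g. on to_matcher_dict([], False): A returns {}, B returns {}
import Mathlib
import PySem

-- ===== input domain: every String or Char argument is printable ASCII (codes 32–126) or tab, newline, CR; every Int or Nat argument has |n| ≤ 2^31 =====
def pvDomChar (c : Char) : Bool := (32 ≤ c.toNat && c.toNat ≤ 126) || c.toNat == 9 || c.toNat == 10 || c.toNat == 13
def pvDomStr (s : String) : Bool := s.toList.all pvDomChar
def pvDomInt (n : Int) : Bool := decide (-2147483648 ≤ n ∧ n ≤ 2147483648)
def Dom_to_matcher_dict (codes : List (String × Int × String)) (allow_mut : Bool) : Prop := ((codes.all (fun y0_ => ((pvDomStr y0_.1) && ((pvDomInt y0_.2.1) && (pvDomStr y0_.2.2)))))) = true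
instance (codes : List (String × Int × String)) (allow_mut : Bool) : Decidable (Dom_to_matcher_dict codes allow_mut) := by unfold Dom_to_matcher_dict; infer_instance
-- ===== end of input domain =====

-- B replaces A's single inline-dedup loop by a two-pass group-then-reduce decomposition; same cost, alternative structure.

-- Python string concatenation s + t (ported on the List Char side; exact)
def scat (a b : String) : String := String.mk (a.toList ++ b.toList)

-- ===== PORT A =====
def to_matcher_dict (codes : List (String × Int × String)) (allow_mut : Bool) : (List (Int × String)) × Int :=
  match codes with
  | [] => ([], 0)  -- Python returns a bare dict {} here (not a pair); excluded by Pre_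
  | (_, min_point, _) :: _ =>
    let result := codes.foldl (fun result c =>
      let first_char := c.1
      let point := c.2.1
      let last_char := c.2.2
      -- if first_char not in result.setdefault(point, ''): result[point] += first_char
      let result := result.setdefault point ""
      let result :=
        if PySem.Str.isIn first_char (result.getD point "") then result
        else result.insert point (scat (result.getD point "") first_char)
      if allow_mut then
        -- if last_char not in result.setdefault(point, ''): result[point] += last_char
        let result := result.setdefault point ""
        if PySem.Str.isIn last_char (result.getD point "") then result
        else result.insert point (scat (result.getD point "") last_char)
      else result) PySem.Dict.empty
    (result.items, min_point)

-- ===== PORT B =====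
-- pass 2's inner dedup fold: acc = ''; for p in pieces: if p not in acc: acc += p
def collapse (pieces : List String) : String :=
  pieces.foldl (fun acc p => if PySem.Str.isIn p acc then acc else scat acc p) ""

def to_matcher_dict_alt (codes : List (String × Int × String)) (allow_mut : Bool) : (List (Int × String)) × Int :=
  match codes with
  | [] => ([], 0)  -- Python B returns {} here, as A does; excluded by Pre_
  | (_, mp, _) :: _ =>
    -- pass 1: group pieces by point
    let groups := codes.foldl (fun g c =>
      let g := g.modify c.2.1 [] (fun l => l ++ [c.1])
      if allow_mut then g.modify c.2.1 [] (fun l => l ++ [c.2.2]) else g) PySem.Dict.empty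
    -- pass 2: collapse each group
    let result := groups.items.foldl (fun r kv => r.insert kv.1 (collapse kv.2)) PySem.Dict.empty
    (result.items, mp)

-- ===== PRECONDITION & SPEC =====
-- Pre_ excludes only the empty codes list, on which A returns a bare dict {} instead of a
-- (dict, min_point) pair — not a value of the declared product return type.
def Pre_to_matcher_dict (codes : List (String × Int × String)) (allow_mut : Bool) : Prop := codes ≠ []
instance (codes : List (String × Int × String)) (allow_mut : Bool) : Decidable (Pre_to_matcher_dict codes allow_mut) := by unfold Pre_to_matcher_dict; infer_instance
def pvWitness_to_matcher_dict : (List (String × Int × String)) × Bool := ([("A", 12, "G")], true)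
def Spec_to_matcher_dict (codes : List (String × Int × String)) (allow_mut : Bool) (out : (List (Int × String)) × Int) : Prop := out = to_matcher_dict_alt codes allow_mut
instance (codes : List (String × Int × String)) (allow_mut : Bool) (out : (List (Int × String)) × Int) : Decidable (Spec_to_matcher_dict codes allow_mut out) := by unfold Spec_to_matcher_dict; infer_instance

-- ===== CLAIM (what is proved, stated in full; the proofs are below) =====
def Claim_equal_to_matcher_dict : Prop := ∀ (codes : List (String × Int × String)) (allow_mut : Bool), Dom_to_matcher_dict codes allow_mut → Pre_to_matcher_dict codes allow_mut → Spec_to_matcher_dict codes allow_mut (to_matcher_dict codes allow_mut)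

-- ===== LEMMAS AND PROOFS =====

-- A's two identical statement blocks, as a function of the dict, the point and the piece
def aStep (d : PySem.Dict Int String) (k : Int) (p : String) : PySem.Dict Int String :=
  let d1 := d.setdefault k ""
  if PySem.Str.isIn p (d1.getD k "") then d1
  else d1.insert k (scat (d1.getD k "") p)

-- A's loop body / B's pass-1 loop body, named for the induction
def aBody (am : Bool) (d : PySem.Dict Int String) (c : String × Int × String) : PySem.Dict Int String :=
  let result := d.setdefault c.2.1 ""
  let result :=
    if PySem.Str.isIn c.1 (result.getD c.2.1 "") then result
    else result.insert c.2.1 (scat (result.getD c.2.1 "") c.1)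
  if am then
    let result := result.setdefault c.2.1 ""
    if PySem.Str.isIn c.2.2 (result.getD c.2.1 "") then result
    else result.insert c.2.1 (scat (result.getD c.2.1 "") c.2.2)
  else result

def bBody (am : Bool) (g : PySem.Dict Int (List String)) (c : String × Int × String) : PySem.Dict Int (List String) :=
  let g := g.modify c.2.1 [] (fun l => l ++ [c.1])
  if am then g.modify c.2.1 [] (fun l => l ++ [c.2.2]) else g

def mapF (l : List (Int × List String)) : List (Int × String) :=
  l.map (fun kv => (kv.1, collapse kv.2))

def collapseD (g : PySem.Dict Int (List String)) : PySem.Dict Int String :=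
  PySem.Dict.mk (mapF g.items)

lemma aBody_eq (am d c) : aBody am d c =
    (if am then aStep (aStep d c.2.1 c.1) c.2.1 c.2.2 else aStep d c.2.1 c.1) := by
  cases am <;> rfl

lemma get?_mapF (l : List (Int × List String)) (k : Int) :
    (PySem.Dict.mk (mapF l)).get? k = ((PySem.Dict.mk l).get? k).map collapse := by
  induction l with
  | nil => rfl
  | cons q l ih =>
    obtain ⟨a, v⟩ := q
    simp [mapF, PySem.Dict.get?_mk_cons] at *
    by_cases h : a = k <;> simp [h, ih]

lemma contains_mapF (l : List (Int × List String)) (k : Int) :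
    (PySem.Dict.mk (mapF l)).contains k = (PySem.Dict.mk l).contains k := by
  simp [PySem.Dict.contains_mk, mapF, List.any_map, Function.comp_def]

lemma map_upd_of_not_contains {ν : Type} (l : List (Int × ν)) (k : Int) (w : ν)
    (h : (PySem.Dict.mk l).contains k = false) :
    l.map (fun q => if q.1 == k then (k, w) else q) = l := by
  simp only [PySem.Dict.contains_mk, List.any_eq_false] at h
  induction l with
  | nil => rfl
  | cons q l ih =>
    simp only [List.mem_cons, forall_eq_or_imp] at h
    simp only [List.map_cons, if_neg h.1, ih h.2]

lemma get?_mk_append_singleton {ν : Type} (l : List (Int × ν)) (k : Int) (x : ν)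
    (h : (PySem.Dict.mk l).contains k = false) :
    (PySem.Dict.mk (l ++ [(k, x)])).get? k = some x := by
  induction l with
  | nil => simp [PySem.Dict.get?_mk_cons, PySem.Dict.get?]
  | cons q l ih =>
    obtain ⟨a, v⟩ := q
    simp only [PySem.Dict.contains_mk, List.any_cons, Bool.or_eq_false_iff] at h
    rw [List.cons_append, PySem.Dict.get?_mk_cons, if_neg (by simp [h.1])]
    exact ih (by simp [PySem.Dict.contains_mk, h.2])

lemma mapF_map_upd (l : List (Int × List String)) (k : Int) (w : List String) :
    mapF (l.map (fun q => if q.1 == k then (k, w) else q)) =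
    (mapF l).map (fun q => if q.1 == k then (k, collapse w) else q) := by
  simp only [mapF, List.map_map]
  apply List.map_congr_left
  intro q _
  by_cases h : q.1 = k <;> simp [h]

lemma collapse_append_singleton (v : List String) (p : String) :
    collapse (v ++ [p]) =
      if PySem.Str.isIn p (collapse v) then collapse v else scat (collapse v) p := by
  simp [collapse, List.foldl_append]

-- the key step: A's statement block on the collapsed dict = collapsing after appending the piece
lemma aStep_collapseD (g : PySem.Dict Int (List String)) (hg : g.keys.Nodup) (k : Int) (p : String) :
    aStep (collapseD g) k p = collapseD (g.modify k [] (fun l => l ++ [p])) := by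
  obtain ⟨l⟩ := g
  by_cases hc : (PySem.Dict.mk l).contains k = true
  · -- the point is already a key
    have hcF : (PySem.Dict.mk (mapF l)).contains k = true := by rw [contains_mapF]; exact hc
    have hsome : ((PySem.Dict.mk l : PySem.Dict Int (List String)).get? k).isSome = true := by
      rw [← PySem.Dict.contains_eq_isSome_get?]; exact hc
    obtain ⟨v, hv⟩ := Option.isSome_iff_exists.mp hsome
    have hvF : (PySem.Dict.mk (mapF l)).get? k = some (collapse v) := by
      rw [get?_mapF, hv]; rfl
    have hupd : ∀ q ∈ l, q.1 = k → q.2 = v := by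
      intro q hq hqk
      have h2 : (PySem.Dict.mk l).get? k = some q.2 :=
        PySem.Dict.get?_of_mem_items _ (by rw [← hqk]; exact hq) hg
      rw [hv] at h2
      exact (Option.some.inj h2).symm
    show aStep (PySem.Dict.mk (mapF l)) k p = _
    unfold aStep PySem.Dict.modify
    simp only [PySem.Dict.setdefault, hcF, if_true, PySem.Dict.getD, hvF, hv,
      Option.getD_some, PySem.Dict.insert, hc, if_true]
    show _ = collapseD (PySem.Dict.mk (l.map (fun q => if q.1 == k then (k, v ++ [p]) else q)))
    have hR : collapseD (PySem.Dict.mk (l.map (fun q => if q.1 == k then (k, v ++ [p]) else q)))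
        = PySem.Dict.mk ((mapF l).map (fun q => if q.1 == k then (k, collapse (v ++ [p])) else q)) := by
      show PySem.Dict.mk (mapF _) = _
      rw [mapF_map_upd]
    rw [hR, collapse_append_singleton]
    by_cases hin : PySem.Str.isIn p (collapse v) = true
    · simp only [hin, if_true]
      apply PySem.Dict.ext
      show mapF l = (mapF l).map _
      have : (mapF l).map (fun q => if q.1 == k then (k, collapse v) else q)
          = (mapF l).map id := by
        apply List.map_congr_left
        intro x hx
        obtain ⟨q, hq, rfl⟩ := List.mem_map.mp hx
        by_cases hqk : q.1 = k
        · simp [hqk, hupd q hq hqk]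
        · simp [hqk]
      rw [this, List.map_id]
    · simp only [hin, Bool.false_eq_true, if_false]
  · -- new key: setdefault / modify both append it
    have hc' : (PySem.Dict.mk l).contains k = false := Bool.not_eq_true _ ▸ eq_false_of_ne_true hc
    have hcF' : (PySem.Dict.mk (mapF l)).contains k = false := by rw [contains_mapF]; exact hc'
    have hget : (PySem.Dict.mk l).get? k = none := by
      have h2 := PySem.Dict.contains_eq_isSome_get? (d := PySem.Dict.mk l) (k := k)
      rw [hc'] at h2
      exact Option.not_isSome_iff_eq_none.mp (by rw [← h2]; simp)
    have hget1 : (PySem.Dict.mk (mapF l ++ [(k, "")])).get? k = some "" :=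
      get?_mk_append_singleton (mapF l) k "" hcF'
    show aStep (PySem.Dict.mk (mapF l)) k p = _
    unfold aStep PySem.Dict.modify
    simp only [PySem.Dict.setdefault, hcF', Bool.false_eq_true, if_false,
      PySem.Dict.getD, hget, hget1, Option.getD_some, Option.getD_none,
      PySem.Dict.insert, hc', PySem.Dict.items]
    show _ = collapseD (PySem.Dict.mk (l ++ [(k, [] ++ [p])]))
    have hR : collapseD (PySem.Dict.mk (l ++ [(k, [] ++ [p])]))
        = PySem.Dict.mk (mapF l ++ [(k, collapse ([] ++ [p]))]) := by
      show PySem.Dict.mk (mapF _) = _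
      simp [mapF]
    rw [hR]
    have hval : collapse ([] ++ [p]) = if PySem.Str.isIn p "" then "" else scat "" p := rfl
    rw [hval]
    by_cases hin : PySem.Str.isIn p "" = true
    · simp only [hin, if_true]
    · simp only [hin, Bool.false_eq_true, if_false]
      have hcontains2 : (PySem.Dict.mk (mapF l ++ [(k, "")])).contains k = true := by
        simp [PySem.Dict.contains_mk]
      simp only [PySem.Dict.insert, hcontains2, if_true]
      apply PySem.Dict.ext
      show (mapF l ++ [(k, "")]).map _ = _
      rw [List.map_append, map_upd_of_not_contains (mapF l) k _ hcF']
      simp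

lemma nodup_keys_bBody (am : Bool) (g : PySem.Dict Int (List String)) (c : String × Int × String)
    (hg : g.keys.Nodup) : (bBody am g c).keys.Nodup := by
  unfold bBody PySem.Dict.modify
  cases am <;> simp <;>
    first
      | exact PySem.Dict.nodup_keys_insert _ _ _ hg
      | exact PySem.Dict.nodup_keys_insert _ _ _ (PySem.Dict.nodup_keys_insert _ _ _ hg)

lemma fold_eq (am : Bool) (cs : List (String × Int × String)) :
    ∀ (g : PySem.Dict Int (List String)), g.keys.Nodup →
    cs.foldl (aBody am) (collapseD g) = collapseD (cs.foldl (bBody am) g) := by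
  induction cs with
  | nil => intro g _; rfl
  | cons c cs ih =>
    intro g hg
    have hstep : aBody am (collapseD g) c = collapseD (bBody am g c) := by
      rw [aBody_eq]
      unfold bBody
      cases am
      · simpa using aStep_collapseD g hg c.2.1 c.1
      · simp only [if_pos]
        rw [aStep_collapseD g hg c.2.1 c.1,
            aStep_collapseD _ (by
              unfold PySem.Dict.modify
              exact PySem.Dict.nodup_keys_insert _ _ _ hg) c.2.1 c.2.2]
    simp only [List.foldl_cons, hstep]
    exact ih _ (nodup_keys_bBody am g c hg)

lemma nodup_keys_bfold (am : Bool) (cs : List (String × Int × String)) :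
    ∀ (g : PySem.Dict Int (List String)), g.keys.Nodup →
    (cs.foldl (bBody am) g).keys.Nodup := by
  induction cs with
  | nil => intro g hg; exact hg
  | cons c cs ih => intro g hg; exact ih _ (nodup_keys_bBody am g c hg)

-- ===== VERDICT (by name: the statement is the Claim_ definition above) =====
theorem to_matcher_dict_spec : Claim_equal_to_matcher_dict := by
  intro codes allow_mut _ hpre
  unfold Spec_to_matcher_dict
  match codes with
  | [] => exact absurd rfl hpre
  | (f, mp, l) :: cs =>
    unfold to_matcher_dict to_matcher_dict_alt
    simp only
    have hA : ∀ d c, (fun result c =>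
      let first_char := (c : String × Int × String).1
      let point := c.2.1
      let last_char := c.2.2
      let result := (result : PySem.Dict Int String).setdefault point ""
      let result :=
        if PySem.Str.isIn first_char (result.getD point "") then result
        else result.insert point (scat (result.getD point "") first_char)
      if allow_mut then
        let result := result.setdefault point ""
        if PySem.Str.isIn last_char (result.getD point "") then result
        else result.insert point (scat (result.getD point "") last_char)
      else result) d c = aBody allow_mut d c := fun _ _ => rfl
    have hB : ∀ g c, (fun g c =>
      let g := (g : PySem.Dict Int (List String)).modify (c : String × Int × String).2.1 [] (fun l => l ++ [c.1])
      if allow_mut then g.modify c.2.1 [] (fun l => l ++ [c.2.2]) else g) g c = bBody allow_mut g c := fun _ _ => rfl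
    simp only [funext (fun d => funext (hA d)), funext (fun g => funext (hB g))]
    have h1 : ((f, mp, l) :: cs).foldl (aBody allow_mut) PySem.Dict.empty
        = collapseD (((f, mp, l) :: cs).foldl (bBody allow_mut) PySem.Dict.empty) :=
      fold_eq allow_mut _ PySem.Dict.empty PySem.Dict.nodup_keys_empty
    have h2 : ∀ (G : PySem.Dict Int (List String)), G.keys.Nodup →
        (G.items.foldl (fun r kv => r.insert kv.1 (collapse kv.2)) PySem.Dict.empty).items
          = (collapseD G).items := by
      intro G hG
      have := PySem.Dict.items_foldl_insert_fresh G.items Prod.fst (fun kv => collapse kv.2)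
        PySem.Dict.empty (fun a _ => PySem.Dict.contains_empty _) hG
      simpa [collapseD, mapF] using this
    rw [h1, h2 _ (nodup_keys_bfold allow_mut _ PySem.Dict.empty PySem.Dict.nodup_keys_empty)]
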